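-- pv_equiv track=rewrite | github.com/DelaramRajaei/Binary-Puzzle | BinaryPuzzle.py | is_edit_distance_one
-- ===== SOURCE A (Python) =====
-- def is_edit_distance_one(s1, s2):
--     # Find lengths of given strings
--     m = len(s1)
--     n = len(s2)
--
--     # If difference between lengths is more than 1,
--     # then strings can't be at one distance
--     if abs(m - n) > 1:
--         return False
--
--     count = 0  # Count of isEditDistanceOne
--
--     i = 0
--     j = 0
--     while i < m and j < n:
--         # If current characters dont match
--         if s1[i] != s2[j]:
--             if count == 1:
--                 return False
--
--             # If length of one string is
--             # more, then only possible edit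
--             # is to remove a character
--             if m > n:
--                 i += 1
--             elif m < n:
--                 j += 1
--             else:  # If lengths of both strings is same
--                 i += 1
--                 j += 1
--
--             # Increment count of edits
--             count += 1
--
--         else:  # if current characters match
--             i += 1
--             j += 1
--
--     # if last character is extra in any string
--     if i < m or j < n:
--         count += 1
--
--     return count == 1
-- ===== SOURCE B (Python) =====
-- def is_edit_distance_one(s1, s2):
--     m, n = len(s1), len(s2)
--     if abs(m - n) > 1:
--         return False
--     if m == n:
--         return sum(c1 != c2 for c1, c2 in zip(s1, s2)) == 1
--     longer, shorter = (s1, s2) if m > n else (s2, s1)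
--     i = 0
--     while i < len(shorter) and longer[i] == shorter[i]:
--         i += 1
--     return longer[i + 1:] == shorter[i:]
-- ===== Notes on version B (the rewrite author's own statement) =====
-- stated objective: simpler
-- what changed: Replaced the single fused two-pointer loop carrying an edit counter by an upfront case split on the lengths: equal lengths are judged by a mismatch count over zip, and lengths differing by one by skipping the common prefix and comparing the remaining slices.
import Mathlib
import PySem

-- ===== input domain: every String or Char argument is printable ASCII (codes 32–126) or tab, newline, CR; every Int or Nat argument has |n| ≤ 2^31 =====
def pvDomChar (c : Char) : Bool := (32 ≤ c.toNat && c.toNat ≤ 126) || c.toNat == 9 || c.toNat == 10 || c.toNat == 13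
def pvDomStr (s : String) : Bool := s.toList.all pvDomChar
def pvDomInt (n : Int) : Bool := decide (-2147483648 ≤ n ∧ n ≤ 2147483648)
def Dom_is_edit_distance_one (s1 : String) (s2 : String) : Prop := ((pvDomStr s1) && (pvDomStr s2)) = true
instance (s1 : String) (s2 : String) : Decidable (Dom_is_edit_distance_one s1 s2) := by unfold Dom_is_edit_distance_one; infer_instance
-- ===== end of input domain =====

-- B replaces A's fused two-pointer loop with a case split on the lengths (mismatch
-- count for equal lengths, common-prefix skip + slice comparison otherwise); simpler.

-- ===== PORT A =====
-- A's while-loop: xs = s1[i:], ys = s2[j:]; m n are the ORIGINAL lengths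
-- (the loop body compares m and n, not the remaining lengths).
def is_edit_loopA (m n : Nat) : List Char → List Char → Nat → Bool
  | x :: xs, y :: ys, count =>
    if x ≠ y then
      if count = 1 then false
      else if m > n then is_edit_loopA m n xs (y :: ys) (count + 1)
      else if m < n then is_edit_loopA m n (x :: xs) ys (count + 1)
      else is_edit_loopA m n xs ys (count + 1)
    else is_edit_loopA m n xs ys count
  | xs, ys, count =>
    -- loop exit: if i < m or j < n, count += 1; return count == 1
    (if xs ≠ [] ∨ ys ≠ [] then count + 1 else count) == 1
termination_by xs ys _ => xs.length + ys.length

def is_edit_distance_one (s1 : String) (s2 : String) : Bool :=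
  let m := s1.toList.length
  let n := s2.toList.length
  if ((m : Int) - (n : Int)).natAbs > 1 then false
  else is_edit_loopA m n s1.toList s2.toList 0

-- ===== PORT B =====
-- B's forward scan for the unequal-length case: skip the common prefix,
-- then longer[i+1:] == shorter[i:].
def is_edit_scanB : List Char → List Char → Bool
  | x :: xs, y :: ys =>
    if x = y then is_edit_scanB xs ys else xs == (y :: ys)
  | xs, ys => xs.drop 1 == ys

def is_edit_distance_one_alt (s1 : String) (s2 : String) : Bool :=
  let m := s1.toList.length
  let n := s2.toList.length
  if ((m : Int) - (n : Int)).natAbs > 1 then false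
  else if m = n then
    ((s1.toList.zip s2.toList).countP (fun p => p.1 ≠ p.2)) == 1
  else if m > n then is_edit_scanB s1.toList s2.toList
  else is_edit_scanB s2.toList s1.toList

-- ===== PRECONDITION & SPEC =====
def Spec_is_edit_distance_one (s1 : String) (s2 : String) (out : Bool) : Prop := out = is_edit_distance_one_alt s1 s2
instance (s1 : String) (s2 : String) (out : Bool) : Decidable (Spec_is_edit_distance_one s1 s2 out) := by unfold Spec_is_edit_distance_one; infer_instance

-- ===== CLAIM (what is proved, stated in full; the proofs are below) =====
def Claim_equal_is_edit_distance_one : Prop := ∀ (s1 : String) (s2 : String), Dom_is_edit_distance_one s1 s2 → Spec_is_edit_distance_one s1 s2 (is_edit_distance_one s1 s2)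

-- ===== LEMMAS AND PROOFS =====

-- Once count = 1, A's loop on equal-length remainders is just list equality.
theorem loopA_count_one (m n : Nat) (xs ys : List Char)
    (h : xs.length = ys.length) : is_edit_loopA m n xs ys 1 = (xs == ys) := by
  induction xs generalizing ys with
  | nil =>
    cases ys with
    | nil => simp [is_edit_loopA]
    | cons y ys => simp at h
  | cons x xs ih =>
    cases ys with
    | nil => simp at h
    | cons y ys =>
      simp only [List.length_cons, Nat.succ_inj] at h
      by_cases hxy : x = y
      · subst hxy
        simp [is_edit_loopA, ih ys h]
      · simp [is_edit_loopA, hxy]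

-- Equal original lengths, equal-length remainders: A's loop counts mismatches.
theorem loopA_eq_len (n : Nat) (xs ys : List Char) (count : Nat)
    (h : xs.length = ys.length) (hc : count ≤ 1) :
    is_edit_loopA n n xs ys count
      = ((count + (xs.zip ys).countP (fun p => p.1 ≠ p.2)) == 1) := by
  induction xs generalizing ys count with
  | nil =>
    cases ys with
    | nil => simp [is_edit_loopA]
    | cons y ys => simp at h
  | cons x xs ih =>
    cases ys with
    | nil => simp at h
    | cons y ys =>
      simp only [List.length_cons, Nat.succ_inj] at h
      by_cases hxy : x = y
      · subst hxy
        simpa [is_edit_loopA, List.countP_cons] using ih ys count h hc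
      · interval_cases count
        · simpa [is_edit_loopA, hxy, List.countP_cons, Nat.add_comm] using
            ih ys 1 h (le_refl 1)
        · simp [is_edit_loopA, hxy]

-- m > n (by one): A's loop from count = 0 equals B's prefix-skip scan.
theorem loopA_gt (m n : Nat) (hmn : m > n) (xs ys : List Char)
    (h : xs.length = ys.length + 1) :
    is_edit_loopA m n xs ys 0 = is_edit_scanB xs ys := by
  induction xs generalizing ys with
  | nil => simp at h
  | cons x xs ih =>
    cases ys with
    | nil =>
      simp only [List.length_cons, List.length_nil, Nat.succ_inj] at h
      match xs, h with
      | [], _ => simp [is_edit_loopA, is_edit_scanB]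
    | cons y ys =>
      simp only [List.length_cons, Nat.succ_inj] at h
      by_cases hxy : x = y
      · subst hxy
        simp [is_edit_loopA, is_edit_scanB, ih ys h]
      · have : is_edit_loopA m n (x :: xs) (y :: ys) 0
            = is_edit_loopA m n xs (y :: ys) 1 := by
          simp [is_edit_loopA, hxy, hmn]
        rw [this, loopA_count_one m n xs (y :: ys) (by simpa using h)]
        simp [is_edit_scanB, hxy]

-- m < n (by one): symmetric; B scans with the arguments swapped.
theorem loopA_lt (m n : Nat) (hmn : m < n) (xs ys : List Char)
    (h : ys.length = xs.length + 1) :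
    is_edit_loopA m n xs ys 0 = is_edit_scanB ys xs := by
  induction ys generalizing xs with
  | nil => simp at h
  | cons y ys ih =>
    cases xs with
    | nil =>
      simp only [List.length_cons, List.length_nil, Nat.succ_inj] at h
      match ys, h with
      | [], _ => simp [is_edit_loopA, is_edit_scanB]
    | cons x xs =>
      simp only [List.length_cons, Nat.succ_inj] at h
      by_cases hxy : x = y
      · subst hxy
        simp [is_edit_loopA, is_edit_scanB, ih xs h]
      · have hnm : ¬ m > n := by omega
        have : is_edit_loopA m n (x :: xs) (y :: ys) 0
            = is_edit_loopA m n (x :: xs) ys 1 := by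
          simp [is_edit_loopA, hxy, hnm, hmn]
        rw [this, loopA_count_one m n (x :: xs) ys (by simpa using h.symm)]
        have hne : ¬ y = x := fun hh => hxy hh.symm
        simp [is_edit_scanB, hne, BEq.comm]

-- ===== VERDICT (by name: the statement is the Claim_ definition above) =====
theorem is_edit_distance_one_spec : Claim_equal_is_edit_distance_one := by
  intro s1 s2 _
  unfold Spec_is_edit_distance_one is_edit_distance_one is_edit_distance_one_alt
  set xs := s1.toList with hxs
  set ys := s2.toList with hys
  by_cases hbig : ((xs.length : Int) - (ys.length : Int)).natAbs > 1
  · simp [hbig]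
  · simp only [hbig, if_false]
    rcases Nat.lt_trichotomy xs.length ys.length with hlt | heq | hgt
    · have hn : ¬ xs.length = ys.length := by omega
      have hg : ¬ xs.length > ys.length := by omega
      have h1 : ys.length = xs.length + 1 := by omega
      simp [hn, hg, loopA_lt _ _ hlt _ _ h1]
    · simp [heq, loopA_eq_len ys.length xs ys 0 heq (by omega)]
    · have hn : ¬ xs.length = ys.length := by omega
      have h1 : xs.length = ys.length + 1 := by omega
      simp [hn, hgt, loopA_gt _ _ hgt _ _ h1]
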